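-- pv_equiv track=rewrite | github.com/LK923/omiBioKit | omibio/analysis/consensus.py | find_profile_matrix
-- ===== SOURCE A (Python) =====
-- def find_profile_matrix(seq_dict: dict) -> tuple[str, dict]:
--     """ Build a profile matrix and find a consensus sequence.
--
--     Build a profile matrix and find a consensus sequence
--     From a dictionary of sequences with the same length.
--
--     Args: seq_dict:
--         A dictionary where keys are the names of sequence
--         and the values are the sequences.
--
--     Returns:
--     A tuple with two elements:
--         consensus: the consensus sequence.
--         profile: a dictionary of profile matrix.
--         profile example:
--
--             {
--             "A" : [4,2,3,1,1,0,2,3],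
--             "C" : [1,2,0,0,1,4,5,6]
--             ...
--             }
--     """
--     sequences = list(seq_dict.values())  # Get all sequences
--     lengths = [len(seq) for seq in sequences]  # Get length list of sequences
--
--     # Check if the sequence lengths are consistent
--     if len(set(lengths)) != 1:
--         raise ValueError("The lengths of sequences are different.")
--     seq_length = lengths[0]  # Get sequence length
--
--     # Create profile dict for each nitrogen base and its list
--     # Extend the length list of each base to the sequence length
--     profile = {base: [0] * seq_length for base in "ACGT"}
--
--     # Count the frequency of base occurrence
--     for sequence in sequences:
--         for i, base in enumerate(sequence):
--             base_frequency = profile[base]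
--             base_frequency[i] += 1
--
--     # Get the consensus according to the profile matrix
--     # Compare the frequency of occurrence each base appears at each position
--     # The base with the highest frequency of occurrence
--     # Will be used as the consensus base.
--     # If the frequencies of occurrence are the same,
--     # The base is selected according to the A-C-G-T priority
--     consensus = "".join(
--         max("ACGT", key=lambda b: profile[b][i]) for i in range(seq_length)
--     )
--
--     return consensus, profile
-- ===== SOURCE B (Python) =====
-- def find_profile_matrix(seq_dict: dict) -> tuple[str, dict]:
--     """Count-based rewrite: transpose once with zip(*sequences), build each
--     profile row as per-column .count(base) values (no mutable counters),
--     and take the consensus directly from column counts.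
--
--     Requires (as Pre_ states) all characters in 'ACGT'; where A would raise
--     KeyError on another character this version still returns a value."""
--     sequences = list(seq_dict.values())
--     lengths = [len(seq) for seq in sequences]
--     if len(set(lengths)) != 1:
--         raise ValueError("The lengths of sequences are different.")
--     columns = list(zip(*sequences))
--     profile = {base: [column.count(base) for column in columns] for base in "ACGT"}
--     consensus = "".join(
--         max("ACGT", key=lambda b: column.count(b)) for column in columns
--     )
--     return consensus, profile
-- ===== Notes on version B (the rewrite author's own statement) =====
-- stated objective: alternative
-- what changed: Replaces A's stateful counting (row-major loop mutating a dict of counter lists, then a separate max scan over the finished profile) by a purely functional construction: transpose once with zip(*sequences), build each profile row as per-column .count(base) values, and read the consensus straight off the column counts.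
import Mathlib
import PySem

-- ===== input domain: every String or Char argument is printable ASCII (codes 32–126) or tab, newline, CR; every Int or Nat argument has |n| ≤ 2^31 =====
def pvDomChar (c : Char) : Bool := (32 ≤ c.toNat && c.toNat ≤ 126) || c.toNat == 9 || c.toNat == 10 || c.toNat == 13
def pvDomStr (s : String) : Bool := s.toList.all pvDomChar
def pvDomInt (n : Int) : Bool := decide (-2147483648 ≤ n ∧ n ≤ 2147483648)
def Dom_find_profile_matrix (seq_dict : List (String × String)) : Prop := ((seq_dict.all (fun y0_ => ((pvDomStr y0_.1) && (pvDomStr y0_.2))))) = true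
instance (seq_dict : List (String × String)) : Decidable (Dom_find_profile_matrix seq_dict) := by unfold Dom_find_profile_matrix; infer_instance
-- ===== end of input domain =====

-- B replaces A's stateful counting (a row-major loop mutating a dict of counter lists, then a
-- separate max scan over the finished profile) by a purely functional construction: transpose
-- once, build each profile row as per-column counts, read the consensus off the column counts.

-- the characters of the Python string "ACGT", iterated by both versions
def pvBases : List Char := ['A', 'C', 'G', 'T']

-- ===== PORT A =====
-- max("ACGT", key=f): first maximal 1-char string under f; "ACGT" is nonempty, so the default is never used
def pvMaxBase (f : Char → Int) : Char := PySem.List.maxD pvBases f 'A'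

-- A's body after `sequences = list(seq_dict.values())`
def pvBodyA (sequences : List String) : String × (List (String × List Int)) :=
  let lengths := sequences.map (fun seq => PySem.Str.len seq)
  if PySem.Set.len (PySem.Set.ofList lengths) ≠ 1 then
    ("", [])  -- raise ValueError("The lengths of sequences are different."): excluded by Pre_
  else
    -- lengths[0]; a string length, hence ≥ 0, so .toNat is exact
    let seqLength := (lengths.headD 0).toNat
    let profile : PySem.Dict String (List Int) :=
      PySem.Dict.ofList (pvBases.map (fun base => (String.ofList [base], List.replicate seqLength (0 : Int))))
    -- for sequence in sequences: for i, base in enumerate(sequence): profile[base][i] += 1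
    -- (profile[base] raises KeyError on a base outside "ACGT": excluded by Pre_; under Pre_ the
    --  key is present, so Dict.modify is exact, and i < seqLength, so List.set/getD are exact)
    let profile := sequences.foldl (fun prof sequence =>
      sequence.toList.zipIdx.foldl (fun prof ic =>
        prof.modify (String.ofList [ic.1]) [] (fun l => l.set ic.2 (l.getD ic.2 0 + 1))) prof) profile
    let consensus := String.ofList ((List.range seqLength).map (fun i =>
      pvMaxBase (fun b => (profile.getD (String.ofList [b]) []).getD i 0)))
    (consensus, profile.items)

def find_profile_matrix (seq_dict : List (String × String)) : String × (List (String × List Int)) :=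
  pvBodyA ((PySem.Dict.ofList seq_dict).values)

-- ===== PORT B =====
-- B's body after `sequences = list(seq_dict.values())`
def pvBodyB (sequences : List String) : String × (List (String × List Int)) :=
  let lengths := sequences.map (fun seq => PySem.Str.len seq)
  if PySem.Set.len (PySem.Set.ofList lengths) ≠ 1 then
    ("", [])  -- raise ValueError: excluded by Pre_
  else
    let seqLength := (lengths.headD 0).toNat
    -- columns = list(zip(*sequences)): column i holds each sequence's character at position i;
    -- under the equal-length guard i < every sequence's length, so the getD default is unreachable
    let columns := (List.range seqLength).map (fun i => sequences.map (fun s => s.toList.getD i 'A'))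
    -- {base: [column.count(base) for column in columns] for base in "ACGT"}
    let profile := pvBases.map (fun base =>
      (String.ofList [base], columns.map (fun column => (column.count base : Int))))
    -- "".join(max("ACGT", key=lambda b: column.count(b)) for column in columns)
    let consensus := String.ofList (columns.map (fun column =>
      PySem.List.maxD pvBases (fun b => (column.count b : Int)) 'A'))
    (consensus, profile)

def find_profile_matrix_alt (seq_dict : List (String × String)) : String × (List (String × List Int)) :=
  pvBodyB ((PySem.Dict.ofList seq_dict).values)

-- ===== PRECONDITION & SPEC =====
-- Pre_ holds exactly where the Python A returns: at least one sequence and all of the same length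
-- (else ValueError), and every character in "ACGT" (else KeyError on profile[base]).
def Pre_find_profile_matrix (seq_dict : List (String × String)) : Prop :=
  let vals := (PySem.Dict.ofList seq_dict).values
  vals ≠ [] ∧
    (vals.all (fun s => s.toList.length == (vals.headD "").toList.length)) = true ∧
    (vals.all (fun s => s.toList.all (fun c => pvBases.contains c))) = true
instance (seq_dict : List (String × String)) : Decidable (Pre_find_profile_matrix seq_dict) := by
  unfold Pre_find_profile_matrix; infer_instance

def pvWitness_find_profile_matrix : (List (String × String)) :=
  [("a", "AC"), ("b", "GT")]

def Spec_find_profile_matrix (seq_dict : List (String × String)) (out : String × (List (String × List Int))) : Prop := out = find_profile_matrix_alt seq_dict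
instance (seq_dict : List (String × String)) (out : String × (List (String × List Int))) : Decidable (Spec_find_profile_matrix seq_dict out) := by unfold Spec_find_profile_matrix; infer_instance

-- ===== CLAIM (what is proved, stated in full; the proofs are below) =====
def Claim_equal_find_profile_matrix : Prop := ∀ (seq_dict : List (String × String)), Dom_find_profile_matrix seq_dict → Pre_find_profile_matrix seq_dict → Spec_find_profile_matrix seq_dict (find_profile_matrix seq_dict)

-- ===== LEMMAS AND PROOFS =====

-- the profile dict always keeps the literal shape {"A": la, "C": lc, "G": lg, "T": lt}
def profD (la lc lg lt : List Int) : PySem.Dict String (List Int) :=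
  PySem.Dict.mk [("A", la), ("C", lc), ("G", lg), ("T", lt)]

-- number of sequences whose character at position j is b
def pvCnt (vals : List String) (b : Char) (j : Nat) : Int :=
  (vals.countP (fun s => s.toList.getD j 'A' == b) : Int)

-- the finished profile row of base b
def colL (vals : List String) (n : Nat) (b : Char) : List Int :=
  (List.range n).map (fun j => pvCnt vals b j)

-- per-base effect of A's inner loop over one sequence
def rowUpd (b : Char) (cs : List Char) (k : Nat) (l : List Int) : List Int :=
  match cs with
  | [] => l
  | c :: cs => rowUpd b cs (k + 1) (if c = b then l.set k (l.getD k 0 + 1) else l)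

theorem getD_set (l : List Int) (k j : Nat) (v : Int) :
    (l.set k v).getD j 0 = if j = k ∧ k < l.length then v else l.getD j 0 := by
  by_cases hjk : j = k ∧ k < l.length
  · obtain ⟨rfl, hk⟩ := hjk
    simp [List.getD_eq_getElem?_getD, hk]
  · rw [if_neg hjk]
    by_cases hj : j = k
    · subst hj
      rw [List.set_eq_of_length_le (by omega)]
    · simp [List.getD_eq_getElem?_getD, List.getElem?_set_ne (fun h => hj h.symm)]

theorem list_eq_of_getD (l m : List Int) (hlen : l.length = m.length)
    (h : ∀ j, j < l.length → l.getD j 0 = m.getD j 0) : l = m := by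
  apply List.ext_getElem hlen
  intro j hj hj'
  have := h j hj
  rwa [List.getD_eq_getElem l 0 hj, List.getD_eq_getElem m 0 hj'] at this

theorem profD_ofList (z : List Int) :
    PySem.Dict.ofList (pvBases.map (fun base => (String.ofList [base], z))) = profD z z z z := by
  simp [pvBases, PySem.Dict.ofList, PySem.Dict.update, PySem.Dict.insert, PySem.Dict.empty,
    PySem.Dict.contains, profD]

theorem profD_getD_A (la lc lg lt : List Int) : (profD la lc lg lt).getD "A" [] = la := by
  simp [profD, PySem.Dict.getD, PySem.Dict.get?]
theorem profD_getD_C (la lc lg lt : List Int) : (profD la lc lg lt).getD "C" [] = lc := by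
  simp [profD, PySem.Dict.getD, PySem.Dict.get?, List.find?]
theorem profD_getD_G (la lc lg lt : List Int) : (profD la lc lg lt).getD "G" [] = lg := by
  simp [profD, PySem.Dict.getD, PySem.Dict.get?, List.find?]
theorem profD_getD_T (la lc lg lt : List Int) : (profD la lc lg lt).getD "T" [] = lt := by
  simp [profD, PySem.Dict.getD, PySem.Dict.get?, List.find?]

theorem bump4 (ch : Char) (hch : ch ∈ pvBases) (f : List Int → List Int) (la lc lg lt : List Int) :
    (profD la lc lg lt).modify (String.ofList [ch]) [] f =
      profD (if ch = 'A' then f la else la) (if ch = 'C' then f lc else lc)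
            (if ch = 'G' then f lg else lg) (if ch = 'T' then f lt else lt) := by
  fin_cases hch <;>
    simp [profD, PySem.Dict.modify, PySem.Dict.insert, PySem.Dict.getD, PySem.Dict.get?,
      PySem.Dict.contains, List.find?]

-- A's inner fold factors into four independent row updates
theorem rowA_factor (cs : List Char) (k : Nat) (hb : ∀ c ∈ cs, c ∈ pvBases)
    (la lc lg lt : List Int) :
    (cs.zipIdx k).foldl (fun prof ic =>
        prof.modify (String.ofList [ic.1]) [] (fun l => l.set ic.2 (l.getD ic.2 0 + 1)))
      (profD la lc lg lt)
    = profD (rowUpd 'A' cs k la) (rowUpd 'C' cs k lc) (rowUpd 'G' cs k lg) (rowUpd 'T' cs k lt) := by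
  induction cs generalizing k la lc lg lt with
  | nil => rfl
  | cons c cs ih =>
    have hc := hb c (by simp)
    simp only [List.zipIdx_cons, List.foldl_cons, rowUpd]
    rw [bump4 c hc, ih (k + 1) (fun c hc => hb c (by simp [hc]))]

theorem rowUpd_length (b : Char) (cs : List Char) (k : Nat) (l : List Int) :
    (rowUpd b cs k l).length = l.length := by
  induction cs generalizing k l with
  | nil => rfl
  | cons c cs ih => simp only [rowUpd]; rw [ih]; split <;> simp

theorem rowUpd_getD (b : Char) (cs : List Char) (k : Nat) (l : List Int)
    (hlen : k + cs.length ≤ l.length) (j : Nat) :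
    (rowUpd b cs k l).getD j 0 =
      l.getD j 0 + (if k ≤ j ∧ j < k + cs.length ∧ cs.getD (j - k) 'A' = b then 1 else 0) := by
  induction cs generalizing k l with
  | nil =>
    simp only [rowUpd, List.length_nil]
    rw [if_neg (by rintro ⟨h1, h2, _⟩; omega)]
    simp
  | cons c cs ih =>
    simp only [rowUpd, List.length_cons] at *
    rw [ih (k + 1) _ (by split <;> first | (simp only [List.length_set]; omega) | omega)]
    by_cases hj : j = k
    · subst hj
      rw [if_neg (α := Int) (by rintro ⟨h1, _⟩; omega), Nat.sub_self, List.getD_cons_zero]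
      by_cases hc : c = b
      · rw [if_pos hc, getD_set, if_pos ⟨rfl, by omega⟩, if_pos ⟨Nat.le_refl _, by omega, hc⟩]
        ring
      · rw [if_neg hc, if_neg (by rintro ⟨_, _, h3⟩; exact hc h3)]
    · have hset : (if c = b then l.set k (l.getD k 0 + 1) else l).getD j 0 = l.getD j 0 := by
        split
        · rw [getD_set, if_neg (fun h => hj h.1)]
        · rfl
      rw [hset]
      congr 1
      by_cases hle : k + 1 ≤ j
      · rw [show j - k = (j - (k + 1)) + 1 from by omega, List.getD_cons_succ]
        exact if_congr (⟨fun ⟨a, b, c⟩ => ⟨by omega, by omega, c⟩,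
          fun ⟨a, b, c⟩ => ⟨by omega, by omega, c⟩⟩) rfl rfl
      · rw [if_neg (by rintro ⟨_, _, _⟩; omega), if_neg (by rintro ⟨h1, _, _⟩; omega)]

-- A's outer fold factors into four independent per-base folds
theorem A_factor (vals : List String) (hb : ∀ s ∈ vals, ∀ c ∈ s.toList, c ∈ pvBases)
    (la lc lg lt : List Int) :
    vals.foldl (fun prof sequence =>
        sequence.toList.zipIdx.foldl (fun prof ic =>
          prof.modify (String.ofList [ic.1]) [] (fun l => l.set ic.2 (l.getD ic.2 0 + 1))) prof)
      (profD la lc lg lt)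
    = profD (vals.foldl (fun l s => rowUpd 'A' s.toList 0 l) la)
            (vals.foldl (fun l s => rowUpd 'C' s.toList 0 l) lc)
            (vals.foldl (fun l s => rowUpd 'G' s.toList 0 l) lg)
            (vals.foldl (fun l s => rowUpd 'T' s.toList 0 l) lt) := by
  induction vals generalizing la lc lg lt with
  | nil => rfl
  | cons v vs ih =>
    simp only [List.foldl_cons]
    rw [rowA_factor v.toList 0 (hb v (by simp)), ih (fun s hs => hb s (by simp [hs]))]

theorem foldl_rowUpd_length (b : Char) (vals : List String) (l : List Int) :
    (vals.foldl (fun l s => rowUpd b s.toList 0 l) l).length = l.length := by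
  induction vals generalizing l with
  | nil => rfl
  | cons v vs ih => simp only [List.foldl_cons]; rw [ih, rowUpd_length]

theorem foldl_rowUpd_getD (b : Char) (vals : List String) (n : Nat)
    (hlen : ∀ s ∈ vals, s.toList.length = n) (l : List Int) (hl : l.length = n)
    (j : Nat) (hj : j < n) :
    (vals.foldl (fun l s => rowUpd b s.toList 0 l) l).getD j 0 = l.getD j 0 + pvCnt vals b j := by
  induction vals generalizing l with
  | nil => simp [pvCnt]
  | cons v vs ih =>
    simp only [List.foldl_cons]
    rw [ih (fun s hs => hlen s (by simp [hs])) _ (by rw [rowUpd_length]; exact hl)]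
    rw [rowUpd_getD b v.toList 0 l (by rw [hlen v (by simp), hl]; omega) j]
    have hv : v.toList.length = n := hlen v (by simp)
    simp only [pvCnt, List.countP_cons, Nat.zero_add, Nat.sub_zero]
    by_cases hc : v.toList.getD j 'A' = b
    · rw [if_pos ⟨Nat.zero_le _, by omega, hc⟩]
      rw [List.getD_eq_getElem?_getD] at hc
      simp [hc]
      ring
    · rw [if_neg (by rintro ⟨_, _, h3⟩; exact hc h3)]
      rw [List.getD_eq_getElem?_getD] at hc
      simp [hc]

-- the row of base b after A's counting loop is the finished row
theorem A_row (b : Char) (vals : List String) (n : Nat)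
    (hlen : ∀ s ∈ vals, s.toList.length = n) :
    vals.foldl (fun l s => rowUpd b s.toList 0 l) (List.replicate n (0 : Int)) = colL vals n b := by
  apply list_eq_of_getD
  · rw [foldl_rowUpd_length]; simp [colL]
  · intro j hj
    rw [foldl_rowUpd_length] at hj
    simp only [List.length_replicate] at hj
    rw [foldl_rowUpd_getD b vals n hlen _ (by simp) j hj]
    simp [colL, List.getD_eq_getElem?_getD, List.getElem?_map, List.getElem?_range hj,
      List.getElem?_replicate, if_pos hj]

-- B's column-i count of base b is the per-position count
theorem col_count (vals : List String) (b : Char) (i : Nat) :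
    (((vals.map (fun s => s.toList.getD i 'A')).count b : Nat) : Int) = pvCnt vals b i := by
  simp [pvCnt, List.count, List.countP_map, Function.comp_def]

-- a character outside "ACGT" never occurs at any position (everything is in "ACGT")
theorem pvCnt_zero (vals : List String) (hb : ∀ s ∈ vals, ∀ c ∈ s.toList, c ∈ pvBases)
    (c : Char) (hc : c ∉ pvBases) (i : Nat) : pvCnt vals c i = 0 := by
  simp only [pvCnt, Int.natCast_eq_zero]
  rw [List.countP_eq_zero]
  intro s hs
  simp only [beq_iff_eq]
  intro hEq
  apply hc
  rw [← hEq]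
  by_cases hlen : i < s.toList.length
  · exact hb s hs _ (by rw [List.getD_eq_getElem _ _ hlen]; exact List.getElem_mem hlen)
  · rw [List.getD_eq_default _ _ (by omega)]
    simp [pvBases]

-- looking up a non-"ACGT" key in the profile dict gives the default []
theorem profD_getD_other (la lc lg lt : List Int) (c : Char) (hc : c ∉ pvBases) :
    (profD la lc lg lt).getD (String.ofList [c]) [] = [] := by
  have hkey : ∀ (d : Char), d ∈ pvBases → (String.ofList [d] == String.ofList [c]) = false := by
    intro d hd
    rw [beq_eq_false_iff_ne]
    intro hEq
    apply hc
    have := congrArg String.toList hEq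
    simp at this
    rwa [← this]
  have hA := hkey 'A' (by simp [pvBases])
  have hC := hkey 'C' (by simp [pvBases])
  have hG := hkey 'G' (by simp [pvBases])
  have hT := hkey 'T' (by simp [pvBases])
  simp [profD, PySem.Dict.getD, PySem.Dict.get?, List.find?,
    show ("A" : String) = String.ofList ['A'] from rfl,
    show ("C" : String) = String.ofList ['C'] from rfl,
    show ("G" : String) = String.ofList ['G'] from rfl,
    show ("T" : String) = String.ofList ['T'] from rfl, hA, hC, hG, hT]

-- reading the finished A profile at column i through the dict keys gives the column counts
theorem read_colL (vals : List String) (n : Nat) (i : Nat) (hi : i < n) (c : Char) (hc : c ∈ pvBases) :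
    ((profD (colL vals n 'A') (colL vals n 'C')
        (colL vals n 'G') (colL vals n 'T')).getD (String.ofList [c]) []).getD i 0
      = pvCnt vals c i := by
  have hget : ∀ b, (colL vals n b).getD i 0 = pvCnt vals b i := by
    intro b
    simp [colL, List.getD_eq_getElem?_getD, List.getElem?_map, List.getElem?_range hi]
  fin_cases hc
  · rw [show String.ofList ['A'] = "A" from rfl, profD_getD_A, hget]
  · rw [show String.ofList ['C'] = "C" from rfl, profD_getD_C, hget]
  · rw [show String.ofList ['G'] = "G" from rfl, profD_getD_G, hget]
  · rw [show String.ofList ['T'] = "T" from rfl, profD_getD_T, hget]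

-- the consensus character of column i as A computes it equals the count form
theorem cons_char_A (vals : List String) (n : Nat)
    (hb : ∀ s ∈ vals, ∀ c ∈ s.toList, c ∈ pvBases) (i : Nat) (hi : i < n) :
    pvMaxBase (fun b => ((profD (colL vals n 'A') (colL vals n 'C')
        (colL vals n 'G') (colL vals n 'T')).getD (String.ofList [b]) []).getD i 0)
      = pvMaxBase (fun b => pvCnt vals b i) := by
  apply congrArg pvMaxBase
  funext c
  by_cases hc : c ∈ pvBases
  · exact read_colL vals n i hi c hc
  · rw [profD_getD_other _ _ _ _ c hc, pvCnt_zero vals hb c hc i]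
    rfl

-- the consensus character of column i as B computes it equals the count form
theorem cons_char_B (vals : List String) (i : Nat) :
    PySem.List.maxD pvBases (fun b => (((vals.map (fun s => s.toList.getD i 'A')).count b : Nat) : Int)) 'A'
      = pvMaxBase (fun b => pvCnt vals b i) := by
  unfold pvMaxBase
  apply congrArg (fun f => PySem.List.maxD pvBases f 'A')
  funext c
  exact col_count vals c i

-- the equivalence over the shared sequence list
theorem body_eq (vals : List String) (hne : vals ≠ [])
    (hlen : ∀ s ∈ vals, s.toList.length = (vals.headD "").toList.length)
    (hb : ∀ s ∈ vals, ∀ c ∈ s.toList, c ∈ pvBases) :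
    pvBodyA vals = pvBodyB vals := by
  obtain ⟨v, vs, rfl⟩ := List.exists_cons_of_ne_nil hne
  unfold pvBodyA pvBodyB
  by_cases hg : PySem.Set.len (PySem.Set.ofList ((v :: vs).map (fun seq => PySem.Str.len seq))) ≠ 1
  · rw [if_pos hg, if_pos hg]
  · rw [if_neg hg, if_neg hg]
    have hn : (((v :: vs).map (fun seq => PySem.Str.len seq)).headD 0).toNat = v.toList.length := by
      simp [PySem.Str.len]
    rw [hn]
    set n := v.toList.length with hdefn
    have hlen' : ∀ s ∈ v :: vs, s.toList.length = n := by
      intro s hs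
      have h := hlen s hs
      rwa [List.headD_cons] at h
    dsimp only
    rw [profD_ofList]
    rw [A_factor _ hb]
    rw [A_row 'A' _ n hlen', A_row 'C' _ n hlen', A_row 'G' _ n hlen', A_row 'T' _ n hlen']
    refine Prod.ext ?_ ?_
    · -- consensus strings agree: both are the count-form consensus, column by column
      apply congrArg String.ofList
      rw [List.map_map]
      apply List.map_congr_left
      intro i hi
      rw [cons_char_A (v :: vs) n hb i (List.mem_range.mp hi)]
      exact (cons_char_B (v :: vs) i).symm
    · -- profiles agree: A's dict items are B's four (key, row) pairs, row by row
      have hrow : ∀ b, ((List.range n).map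
            (fun i => v.toList.getD i 'A' :: vs.map (fun s => s.toList.getD i 'A'))).map
          (fun column => ((column.count b : Nat) : Int)) = colL (v :: vs) n b := by
        intro b
        rw [List.map_map]
        apply List.map_congr_left
        intro i _
        have h := col_count (v :: vs) b i
        simpa using h
      show (profD _ _ _ _).items = _
      simp only [pvBases, List.map_cons, List.map_nil]
      rw [hrow 'A', hrow 'C', hrow 'G', hrow 'T']
      rfl

-- ===== VERDICT (by name: the statement is the Claim_ definition above) =====
theorem find_profile_matrix_spec : Claim_equal_find_profile_matrix := by
  intro seq_dict _ hpre
  obtain ⟨hne, hlen, hb⟩ := hpre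
  unfold Spec_find_profile_matrix find_profile_matrix find_profile_matrix_alt
  refine body_eq _ hne ?_ ?_
  · intro s hs
    simp only [List.all_eq_true, beq_iff_eq] at hlen
    exact hlen s hs
  · intro s hs c hc
    simp only [List.all_eq_true, List.contains_eq_mem, decide_eq_true_eq] at hb
    exact hb s hs c hc
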